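-- pv_equiv track=rewrite | github.com/DimitarRDimitrov/Programming101 | Week0/is_an_bn.py | is_an_bn
-- ===== SOURCE A (Python) =====
-- from copy import copy
--
-- def is_an_bn(word):
--     a_counter = 0
--     b_counter = 0
--     i = 0
--     cword = copy(word)
--     for char in word:
--         if char == "a":
--             a_counter += 1
--         elif char == "b":
--             b_counter += 1
--     if a_counter == b_counter:
--         while i < len(word) + 1:
--             cword = cword.replace("a"*i + "b"*i, "")
--             if cword == "":
--                 return True
--             else:
--                 i += 1
--                 cword = word
--         return False
--     else:
--         return False
-- ===== SOURCE B (Python) =====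
-- def is_an_bn(word):
--     # O(n): a word of repeated a^i b^i blocks is fully determined by its
--     # leading run of 'a's, so measure that run and compare once.
--     n = len(word)
--     if n == 0:
--         return True
--     i = 0
--     while i < n and word[i] == "a":
--         i += 1
--     if i == 0 or n % (2 * i) != 0:
--         return False
--     return word == ("a" * i + "b" * i) * (n // (2 * i))
-- ===== Notes on version B (the rewrite author's own statement) =====
-- stated objective: faster
-- what changed: Replaced the quadratic try-every-block-size replace() loop by a single pass: measure the leading run of 'a's (the only possible block half-size) and compare the word once against that block repeated.
import Mathlib
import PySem

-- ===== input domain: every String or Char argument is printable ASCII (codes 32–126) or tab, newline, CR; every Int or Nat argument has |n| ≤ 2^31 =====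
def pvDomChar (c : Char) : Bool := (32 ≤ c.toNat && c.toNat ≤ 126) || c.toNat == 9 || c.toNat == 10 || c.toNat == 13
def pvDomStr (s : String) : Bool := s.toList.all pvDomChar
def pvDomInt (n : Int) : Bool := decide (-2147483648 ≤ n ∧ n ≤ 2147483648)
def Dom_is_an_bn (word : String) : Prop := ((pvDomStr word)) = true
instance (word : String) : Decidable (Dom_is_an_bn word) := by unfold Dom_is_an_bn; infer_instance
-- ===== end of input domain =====

-- B replaces A's quadratic replace()-every-block-size loop by one O(n) scan; equivalence proved below.

-- the literal '"a"*i + "b"*i' both Python versions build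
def patAB (i : Nat) : List Char := List.replicate i 'a' ++ List.replicate i 'b'

-- ===== PORT A =====
-- the while loop: i counts up while i < len(word) + 1
def isAnBnLoopA (l : List Char) (i : Nat) : Bool :=
  if i < l.length + 1 then
    if PySem.Chars.replace l (patAB i) [] = [] then true else isAnBnLoopA l (i + 1)
  else false
termination_by l.length + 1 - i

def is_an_bn (word : String) : Bool :=
  let l := word.toList
  let counters := l.foldl
    (fun (p : Nat × Nat) char =>
      if char = 'a' then (p.1 + 1, p.2)
      else if char = 'b' then (p.1, p.2 + 1)
      else p) (0, 0)
  if counters.1 = counters.2 then isAnBnLoopA l 0 else false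

-- ===== PORT B =====
-- the 'while i < n and word[i] == "a"' scan
def leadA : List Char → Nat
  | [] => 0
  | c :: t => if c = 'a' then leadA t + 1 else 0

-- string repetition pat * m
def repBlock (p : List Char) : Nat → List Char
  | 0 => []
  | k + 1 => p ++ repBlock p k

def is_an_bn_alt (word : String) : Bool :=
  let l := word.toList
  let n := l.length
  if n = 0 then true
  else
    let i := leadA l
    if i = 0 ∨ n % (2 * i) ≠ 0 then false
    else decide (l = repBlock (patAB i) (n / (2 * i)))

-- ===== PRECONDITION & SPEC =====
def Spec_is_an_bn (word : String) (out : Bool) : Prop := out = is_an_bn_alt word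
instance (word : String) (out : Bool) : Decidable (Spec_is_an_bn word out) := by unfold Spec_is_an_bn; infer_instance

-- ===== CLAIM (what is proved, stated in full; the proofs are below) =====
def Claim_equal_is_an_bn : Prop := ∀ (word : String), Dom_is_an_bn word → Spec_is_an_bn word (is_an_bn word)

-- ===== LEMMAS AND PROOFS =====

-- what repeated str.replace(old, "") leaves of l
def repRem (old : List Char) : List Char → List Char
  | [] => []
  | c :: t =>
    if h : old.isPrefixOf (c :: t) ∧ old ≠ [] then repRem old ((c :: t).drop old.length)
    else c :: repRem old t
termination_by l => l.length
decreasing_by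
  · have : 0 < old.length := List.length_pos_iff.mpr h.2
    simp
    omega
  · simp

theorem go_spec (old : List Char) (h : old ≠ []) :
    ∀ (fuel : Nat) (l acc : List Char), l.length ≤ fuel →
      PySem.Chars.replace.go old [] fuel l acc = acc.reverse ++ repRem old l := by
  intro fuel
  induction fuel with
  | zero =>
    intro l acc hl
    have : l = [] := List.length_eq_zero_iff.mp (Nat.le_zero.mp hl)
    subst this
    simp [PySem.Chars.replace.go, repRem]
  | succ fuel ih =>
    intro l acc hl
    match l with
    | [] => simp [PySem.Chars.replace.go, repRem]
    | c :: t =>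
      by_cases hp : old.isPrefixOf (c :: t)
      · have hlen : 0 < old.length := List.length_pos_iff.mpr h
        rw [show PySem.Chars.replace.go old [] (fuel + 1) (c :: t) acc =
              (if old.isPrefixOf (c :: t) then
                 PySem.Chars.replace.go old [] fuel (List.drop old.length (c :: t)) ([].reverse ++ acc)
               else PySem.Chars.replace.go old [] fuel t (c :: acc)) from rfl]
        rw [if_pos hp]
        rw [repRem]
        rw [dif_pos ⟨hp, h⟩]
        rw [ih _ _ (by simp at hl ⊢; omega)]
        simp
      · rw [show PySem.Chars.replace.go old [] (fuel + 1) (c :: t) acc =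
              (if old.isPrefixOf (c :: t) then
                 PySem.Chars.replace.go old [] fuel (List.drop old.length (c :: t)) ([].reverse ++ acc)
               else PySem.Chars.replace.go old [] fuel t (c :: acc)) from rfl]
        rw [if_neg hp]
        rw [repRem]
        rw [dif_neg (by tauto)]
        rw [ih _ _ (by simp at hl ⊢; omega)]
        simp

theorem replace_eq_repRem (old l : List Char) (h : old ≠ []) :
    PySem.Chars.replace l old [] = repRem old l := by
  rw [PySem.Chars.replace]
  rw [if_neg (by simpa [List.isEmpty_iff] using h)]
  rw [go_spec old h l.length l [] le_rfl]
  simp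

theorem replace_nil_old (l : List Char) : PySem.Chars.replace l [] [] = l := by
  rw [PySem.Chars.replace]
  simp

theorem repRem_eq_nil_iff (old : List Char) (h : old ≠ []) (l : List Char) :
    repRem old l = [] ↔ ∃ k, l = repBlock old k := by
  constructor
  · intro he
    induction l using repRem.induct old with
    | case1 => exact ⟨0, rfl⟩
    | case2 c t hcond ih =>
      rw [repRem, dif_pos hcond] at he
      obtain ⟨k, hk⟩ := ih he
      refine ⟨k + 1, ?_⟩
      have hpre : old <+: (c :: t) := List.isPrefixOf_iff_prefix.mp hcond.1
      obtain ⟨rest, hrest⟩ := hpre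
      rw [← hrest] at hk ⊢
      rw [List.drop_left] at hk
      rw [repBlock, ← hk]
    | case3 c t hcond ih =>
      rw [repRem, dif_neg hcond] at he
      simp at he
  · rintro ⟨k, rfl⟩
    induction k with
    | zero => rw [repBlock, repRem]
    | succ k ih =>
      rw [repBlock]
      match hb : old ++ repBlock old k with
      | [] => simp at hb; exact absurd hb.1 h
      | c :: t =>
        rw [repRem]
        rw [dif_pos ⟨by rw [← hb]; exact List.isPrefixOf_iff_prefix.mpr ⟨repBlock old k, rfl⟩, h⟩]
        rw [← hb, List.drop_left]
        exact ih

theorem loopA_iff (l : List Char) (i : Nat) :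
    isAnBnLoopA l i = true ↔
      ∃ j, i ≤ j ∧ j ≤ l.length ∧ PySem.Chars.replace l (patAB j) [] = [] := by
  induction i using isAnBnLoopA.induct l with
  | case1 i hi hrep =>
    rw [isAnBnLoopA, if_pos hi, if_pos hrep]
    constructor
    · intro _; exact ⟨i, le_rfl, by omega, hrep⟩
    · intro _; rfl
  | case2 i hi hrep ih =>
    rw [isAnBnLoopA, if_pos hi, if_neg hrep]
    rw [ih]
    constructor
    · rintro ⟨j, h1, h2, h3⟩; exact ⟨j, by omega, h2, h3⟩
    · rintro ⟨j, h1, h2, h3⟩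
      refine ⟨j, ?_, h2, h3⟩
      rcases Nat.eq_or_lt_of_le h1 with rfl | hlt
      · exact absurd h3 hrep
      · omega
  | case3 i hi =>
    rw [isAnBnLoopA, if_neg hi]
    constructor
    · intro h; simp at h
    · rintro ⟨j, h1, h2, _⟩; exact absurd h2 (by omega)

-- the common characterization
def GoodWord (l : List Char) : Prop :=
  l = [] ∨ ∃ i k, 1 ≤ i ∧ 1 ≤ k ∧ l = repBlock (patAB i) k

theorem length_repBlock (p : List Char) (k : Nat) :
    (repBlock p k).length = k * p.length := by
  induction k with
  | zero => simp [repBlock]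
  | succ k ih => rw [repBlock]; simp [ih]; ring

theorem count_repBlock (p : List Char) (k : Nat) (x : Char) :
    (repBlock p k).count x = k * p.count x := by
  induction k with
  | zero => simp [repBlock]
  | succ k ih => rw [repBlock]; simp [ih]; ring

theorem leadA_replicate_append (i : Nat) (l : List Char) :
    leadA (List.replicate i 'a' ++ l) = i + leadA l := by
  induction i with
  | zero => simp
  | succ i ih => rw [List.replicate_succ, List.cons_append]; simp [leadA, ih]; omega

theorem leadA_repBlock (i k : Nat) (hi : 1 ≤ i) :
    leadA (repBlock (patAB i) (k + 1)) = i := by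
  rw [repBlock, patAB, List.append_assoc, leadA_replicate_append]
  match i, hi with
  | i + 1, _ =>
    have : List.replicate (i + 1) 'b' = 'b' :: List.replicate i 'b' := rfl
    rw [this]
    simp [leadA]

theorem counter_fold (l : List Char) (a b : Nat) :
    l.foldl (fun (p : Nat × Nat) char =>
      if char = 'a' then (p.1 + 1, p.2)
      else if char = 'b' then (p.1, p.2 + 1)
      else p) (a, b) = (a + l.count 'a', b + l.count 'b') := by
  induction l generalizing a b with
  | nil => simp
  | cons c t ih =>
    by_cases h1 : c = 'a'
    · subst h1; simp [ih, List.count_cons]; omega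
    · by_cases h2 : c = 'b'
      · subst h2; simp [ih, h1]; omega
      · simp [h1, h2, ih, List.count_cons]

theorem A_iff (word : String) : is_an_bn word = true ↔ GoodWord word.toList := by
  simp only [is_an_bn, counter_fold, Nat.zero_add]
  constructor
  · intro h
    split at h
    case isFalse => simp at h
    case isTrue hcnt =>
      obtain ⟨j, _, hj2, hj3⟩ := (loopA_iff word.toList 0).mp h
      match j with
      | 0 =>
        rw [show patAB 0 = [] from rfl, replace_nil_old] at hj3
        exact Or.inl hj3
      | j + 1 =>
        have hpat : patAB (j + 1) ≠ [] := by simp [patAB]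
        rw [replace_eq_repRem _ _ hpat] at hj3
        obtain ⟨k, hk⟩ := (repRem_eq_nil_iff _ hpat _).mp hj3
        match k with
        | 0 => exact Or.inl (by simpa [repBlock] using hk)
        | k + 1 => exact Or.inr ⟨j + 1, k + 1, by omega, by omega, hk⟩
  · intro h
    have hcnt : (List.count 'a' word.toList) = List.count 'b' word.toList := by
      rcases h with h | ⟨i, k, hi, hk, hl⟩
      · rw [h]; rfl
      · rw [hl, count_repBlock, count_repBlock, patAB]
        simp [List.count_replicate]
    rw [if_pos hcnt]
    rw [loopA_iff]
    rcases h with h | ⟨i, k, hi, hk, hl⟩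
    · exact ⟨0, le_rfl, by omega, by rw [h, show patAB 0 = [] from rfl, replace_nil_old]⟩
    · have hpat : patAB i ≠ [] := by
        simp [patAB]
        omega
      refine ⟨i, by omega, ?_, ?_⟩
      · rw [hl, length_repBlock, patAB]
        simp
        nlinarith
      · rw [replace_eq_repRem _ _ hpat]
        exact (repRem_eq_nil_iff _ hpat _).mpr ⟨k, hl⟩

theorem B_iff (word : String) : is_an_bn_alt word = true ↔ GoodWord word.toList := by
  simp only [is_an_bn_alt]
  split
  case isTrue h =>
    exact iff_of_true rfl (Or.inl (List.length_eq_zero_iff.mp h))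
  case isFalse hn =>
    have hne : word.toList ≠ [] := fun he => hn (by rw [he]; rfl)
    split
    case isTrue hbad =>
      refine iff_of_false (by simp) ?_
      rintro (h | ⟨i, k, hi, hk, hl⟩)
      · exact hne h
      · have hlead : leadA word.toList = i := by
          obtain ⟨k', rfl⟩ : ∃ k', k = k' + 1 := ⟨k - 1, by omega⟩
          rw [hl]; exact leadA_repBlock i k' hi
        have hlen : word.toList.length = k * (2 * i) := by
          rw [hl, length_repBlock, show (patAB i).length = 2 * i by simp [patAB]; omega]
        rcases hbad with h0 | hmod
        · omega
        · rw [hlead, hlen] at hmod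
          exact hmod (Nat.mul_mod_left k (2 * i))
    case isFalse hok =>
      push_neg at hok
      obtain ⟨h0, hmod⟩ := hok
      rw [decide_eq_true_iff]
      constructor
      · intro he
        refine Or.inr ⟨leadA word.toList, word.toList.length / (2 * leadA word.toList), by omega, ?_, he⟩
        rcases Nat.eq_zero_or_pos (word.toList.length / (2 * leadA word.toList)) with hzero | hpos
        · rw [hzero, repBlock] at he; exact absurd he hne
        · exact hpos
      · rintro (h | ⟨i, k, hi, hk, hl⟩)
        · exact absurd h hne
        · have hlead : leadA word.toList = i := by
            obtain ⟨k', rfl⟩ : ∃ k', k = k' + 1 := ⟨k - 1, by omega⟩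
            rw [hl]; exact leadA_repBlock i k' hi
          have hlen : word.toList.length = k * (2 * i) := by
            rw [hl, length_repBlock, show (patAB i).length = 2 * i by simp [patAB]; omega]
          rw [hlead, hlen, Nat.mul_div_left k (by omega : 0 < 2 * i)]
          exact hl

-- ===== VERDICT (by name: the statement is the Claim_ definition above) =====
theorem is_an_bn_spec : Claim_equal_is_an_bn := by
  intro word _
  unfold Spec_is_an_bn
  rw [Bool.eq_iff_iff, A_iff, B_iff]
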